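-- pv_equiv track=rewrite | github.com/Antoine07/Data-01 | Exercices_supplementaires/Permutation_circular/permutation_circular.py | allCircular
-- ===== SOURCE A (Python) =====
-- def allCircular(l):
--
--     def circular(m):
--         for i in range(len(m) - 1):
--             m[i], m[i+1] = m[i+1], m[i]
--
--         return m
--
--     permute = []
--     permute.append(l)
--     p = circular(l[:])
--     while True:
--         if p in permute:
--             break
--         permute.append(p)
--         p = circular(p[:])
--
--     return permute
-- ===== SOURCE B (Python) =====
-- def allCircular(l):
--     result = [l]
--     for i in range(1, len(l)):
--         rot = l[i:] + l[:i]
--         if rot == l: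
--             break
--         result.append(rot)
--     return result
-- ===== Notes on version B (the rewrite author's own statement) =====
-- stated objective: simpler
-- what changed: B builds each rotation directly by slicing l[i:]+l[:i] and stops when the rotation cycles back to l itself, dropping A's mutating adjacent-swap pass and the membership scan over the accumulated list of rotations.
import Mathlib
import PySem

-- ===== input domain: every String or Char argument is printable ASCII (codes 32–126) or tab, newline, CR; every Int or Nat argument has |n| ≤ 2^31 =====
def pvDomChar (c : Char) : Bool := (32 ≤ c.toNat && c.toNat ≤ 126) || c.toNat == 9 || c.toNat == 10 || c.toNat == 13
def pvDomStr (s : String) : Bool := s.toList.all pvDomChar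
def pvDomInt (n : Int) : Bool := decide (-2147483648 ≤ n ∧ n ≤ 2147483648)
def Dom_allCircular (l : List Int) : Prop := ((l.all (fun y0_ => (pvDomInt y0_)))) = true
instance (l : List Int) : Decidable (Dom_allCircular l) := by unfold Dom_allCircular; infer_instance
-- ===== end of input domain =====

-- B replaces A's adjacent-swap mutation pass and membership scan over the accumulated
-- rotations by direct slice rotations l[i:]+l[:i] that stop on cycling back to l (simpler).

-- ===== PORT A =====
-- inner 'circular': the for-loop of adjacent swaps bubbles the head to the end,
-- rendered as the obvious structural recursion over the same list.
def circularA : List Int → List Int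
  | [] => []
  | [x] => [x]
  | x :: y :: rest => y :: circularA (x :: rest)

-- the 'while True' loop; fuel = len(l)+1 iterations always suffice (after len(l)
-- rotations p equals l ∈ permute), so the fuel-out branch is never reached.
def loopA : Nat → List (List Int) → List Int → List (List Int)
  | 0, permute, _ => permute
  | fuel + 1, permute, p =>
    if p ∈ permute then permute
    else loopA fuel (permute ++ [p]) (circularA p)

def allCircular (l : List Int) : List (List Int) :=
  loopA (l.length + 1) [l] (circularA l)

-- ===== PORT B =====
-- the for-loop over range(1, len(l)) with its break; l[i:]+l[:i] for 0 ≤ i is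
-- exactly l.drop i ++ l.take i.
def goB (l : List Int) (n i : Nat) : List (List Int) :=
  if i < n then
    let rot := l.drop i ++ l.take i
    if rot = l then [] else rot :: goB l n (i + 1)
  else []
termination_by n - i

def allCircular_alt (l : List Int) : List (List Int) :=
  l :: goB l l.length 1

-- ===== PRECONDITION & SPEC =====
def Spec_allCircular (l : List Int) (out : List (List Int)) : Prop := out = allCircular_alt l
instance (l : List Int) (out : List (List Int)) : Decidable (Spec_allCircular l out) := by unfold Spec_allCircular; infer_instance

-- ===== CLAIM (what is proved, stated in full; the proofs are below) =====
def Claim_equal_allCircular : Prop := ∀ (l : List Int), Dom_allCircular l → Spec_allCircular l (allCircular l)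

-- ===== LEMMAS AND PROOFS =====

-- circularA is left-rotation by one
theorem circularA_cons (x : Int) (xs : List Int) : circularA (x :: xs) = xs ++ [x] := by
  induction xs generalizing x with
  | nil => simp [circularA]
  | cons y rest ih => simp [circularA, ih]

theorem circularA_eq_rotate (l : List Int) : circularA l = l.rotate 1 := by
  cases l with
  | nil => simp [circularA, List.rotate]
  | cons x xs => simp [circularA_cons, List.rotate_cons_succ]

-- rotation by a fixed amount is injective
theorem rotate_inj {x y : List Int} {j : Nat} (h : x.rotate j = y.rotate j) : x = y := by
  have hx := (List.rotate_eq_iff).mp h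
  have hy := (List.rotate_eq_iff).mp (rfl : y.rotate j = y.rotate j)
  exact hx.trans hy.symm

-- the least positive period of l under left rotation
theorem period_ex (l : List Int) : ∃ k, 0 < k ∧ l.rotate k = l := by
  cases l with
  | nil => exact ⟨1, Nat.one_pos, rfl⟩
  | cons x xs => exact ⟨(x :: xs).length, by simp, List.rotate_length _⟩

def period (l : List Int) : Nat := Nat.find (period_ex l)

theorem period_pos (l : List Int) : 0 < period l := (Nat.find_spec (period_ex l)).1
theorem period_rotate (l : List Int) : l.rotate (period l) = l := (Nat.find_spec (period_ex l)).2
theorem period_min (l : List Int) {k : Nat} (h1 : 0 < k) (h2 : k < period l) :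
    l.rotate k ≠ l := fun hr => Nat.find_min (period_ex l) h2 ⟨h1, hr⟩
theorem period_le_length (l : List Int) (h : 0 < l.length) : period l ≤ l.length :=
  Nat.find_min' (period_ex l) ⟨h, List.rotate_length l⟩

-- A's loop invariant: from state (rotations 0..k-1 collected, p = rotation k)
-- the loop finishes with the rotations 0..period-1.
theorem loopA_inv (l : List Int) (fuel k : Nat) (hk1 : 1 ≤ k) (hkd : k ≤ period l)
    (hfuel : period l - k < fuel) :
    loopA fuel ((List.range k).map (l.rotate ·)) (l.rotate k)
      = (List.range (period l)).map (l.rotate ·) := by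
  induction fuel generalizing k with
  | zero => omega
  | succ fuel ih =>
    rw [loopA]
    by_cases hmem : l.rotate k ∈ (List.range k).map (l.rotate ·)
    · -- a repeat: must be k = period l
      simp only [List.mem_map, List.mem_range] at hmem
      obtain ⟨j, hj, hrot⟩ := hmem
      have hfix : l.rotate (k - j) = l := by
        have h1 : (l.rotate (k - j)).rotate j = l.rotate j := by
          rw [List.rotate_rotate]
          have : k - j + j = k := by omega
          rw [this, ← hrot]
        exact rotate_inj h1
      have hkd' : k = period l := by
        rcases Nat.lt_or_ge (k - j) (period l) with hlt | hge
        · exact absurd hfix (period_min l (by omega) hlt)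
        · omega
      rw [if_pos (by simp only [List.mem_map, List.mem_range]; exact ⟨j, hj, hrot⟩), hkd']
    · -- no repeat yet: k < period l, take one more step
      have hkd' : k < period l := by
        rcases Nat.lt_or_ge k (period l) with h | h
        · exact h
        · exfalso
          have hk : k = period l := by omega
          apply hmem
          simp only [List.mem_map, List.mem_range]
          exact ⟨0, by omega, by rw [List.rotate_zero, hk, period_rotate]⟩
      rw [if_neg hmem, circularA_eq_rotate, List.rotate_rotate]
      have hrange : (List.range k).map (l.rotate ·) ++ [l.rotate k]
          = (List.range (k + 1)).map (l.rotate ·) := by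
        rw [List.range_succ, List.map_append]; rfl
      rw [hrange]
      exact ih (k + 1) (by omega) (by omega) (by omega)

theorem allCircular_eq (l : List Int) :
    allCircular l = (List.range (period l)).map (l.rotate ·) := by
  have h0 : [l] = (List.range 1).map (l.rotate ·) := by simp
  have hle : period l ≤ l.length + 1 := by
    cases l with
    | nil =>
      have : period ([] : List Int) ≤ 1 := Nat.find_min' (period_ex []) ⟨Nat.one_pos, rfl⟩
      omega
    | cons x xs =>
      have := period_le_length (x :: xs) (by simp)
      omega
  rw [allCircular, h0, circularA_eq_rotate]
  exact loopA_inv l (l.length + 1) 1 le_rfl (period_pos l) (by omega)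

-- B's loop computes rotations i..period-1 (for 1 ≤ i ≤ period ≤ len l)
theorem goB_eq (l : List Int) (i : Nat) (hi : 1 ≤ i) (hid : i ≤ period l)
    (hdn : period l ≤ l.length) :
    goB l l.length i = (List.range' i (period l - i)).map (l.rotate ·) := by
  induction hd : period l - i generalizing i with
  | zero =>
    have hi' : i = period l := by omega
    rw [goB]
    by_cases hlt : i < l.length
    · rw [if_pos hlt]
      have : l.drop i ++ l.take i = l := by
        rw [← List.rotate_eq_drop_append_take (by omega), hi', period_rotate]
      simp [this]
    · rw [if_neg hlt]; simp
  | succ m ih =>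
    have hlt : i < l.length := by omega
    rw [goB, if_pos hlt]
    have hrot : l.drop i ++ l.take i = l.rotate i :=
      (List.rotate_eq_drop_append_take (by omega)).symm
    have hne : l.rotate i ≠ l := period_min l (by omega) (by omega)
    rw [hrot, if_neg hne, ih (i + 1) (by omega) (by omega) (by omega)]
    rfl

theorem allCircular_alt_eq (l : List Int) :
    allCircular_alt l = (List.range (period l)).map (l.rotate ·) := by
  rw [allCircular_alt]
  cases l with
  | nil =>
    have h1 : period ([] : List Int) = 1 :=
      Nat.le_antisymm (Nat.find_min' (period_ex []) ⟨Nat.one_pos, rfl⟩) (period_pos [])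
    rw [h1, goB]; simp
  | cons x xs =>
    have hn : 0 < (x :: xs).length := by simp
    have hdn := period_le_length (x :: xs) hn
    rw [goB_eq (x :: xs) 1 le_rfl (period_pos _) hdn]
    have hd := period_pos (x :: xs)
    have hr : List.range (period (x :: xs)) = 0 :: List.range' 1 (period (x :: xs) - 1) := by
      rw [List.range_eq_range', show period (x :: xs) = (period (x :: xs) - 1) + 1 by omega]
      rfl
    rw [hr]
    simp

-- ===== VERDICT (by name: the statement is the Claim_ definition above) =====
theorem allCircular_spec : Claim_equal_allCircular := by
  intro l _
  unfold Spec_allCircular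
  rw [allCircular_eq, allCircular_alt_eq]
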